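-- pv_equiv track=rewrite | github.com/MateuszMirecki/Genetyczne | GP/fitness_functions.py | fitness_1_1_A
-- ===== SOURCE A (Python) =====
-- def fitness_1_1_A(out, excpected_out, input_numbers, read_vars=0, current_variables = "{'X1':1}", number_of_inputs_after_reading_all_vars = 0, program = " " ,):
--     fit = 0
--     if read_vars > 2:
--         if number_of_inputs_after_reading_all_vars >0:
--             return -1
--         if len(out) == 0:
--             return -1234
--         elif 1 in out:
--             return -20
--         else:
--             for i in range(len(excpected_out)):
--                 fit += -50
--     else:
--         return -300
--     return fit
-- ===== SOURCE B (Python) =====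
-- def fitness_1_1_A(out, excpected_out, input_numbers, read_vars=0, current_variables="{'X1':1}", number_of_inputs_after_reading_all_vars=0, program=" "):
--     # decision table: first matching guard wins; default is the closed form -50*len
--     cases = [
--         (read_vars <= 2, -300),
--         (number_of_inputs_after_reading_all_vars > 0, -1),
--         (len(out) == 0, -1234),
--         (1 in out, -20),
--     ]
--     return next((v for cond, v in cases if cond), -50 * len(excpected_out))
-- ===== Notes on version B (the rewrite author's own statement) =====
-- stated objective: simpler
-- what changed: Replaced A's nested branches and -50 accumulator loop with a decision table (list of guard/value pairs scanned for the first true guard) whose default is the closed form -50*len(excpected_out).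
import Mathlib
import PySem

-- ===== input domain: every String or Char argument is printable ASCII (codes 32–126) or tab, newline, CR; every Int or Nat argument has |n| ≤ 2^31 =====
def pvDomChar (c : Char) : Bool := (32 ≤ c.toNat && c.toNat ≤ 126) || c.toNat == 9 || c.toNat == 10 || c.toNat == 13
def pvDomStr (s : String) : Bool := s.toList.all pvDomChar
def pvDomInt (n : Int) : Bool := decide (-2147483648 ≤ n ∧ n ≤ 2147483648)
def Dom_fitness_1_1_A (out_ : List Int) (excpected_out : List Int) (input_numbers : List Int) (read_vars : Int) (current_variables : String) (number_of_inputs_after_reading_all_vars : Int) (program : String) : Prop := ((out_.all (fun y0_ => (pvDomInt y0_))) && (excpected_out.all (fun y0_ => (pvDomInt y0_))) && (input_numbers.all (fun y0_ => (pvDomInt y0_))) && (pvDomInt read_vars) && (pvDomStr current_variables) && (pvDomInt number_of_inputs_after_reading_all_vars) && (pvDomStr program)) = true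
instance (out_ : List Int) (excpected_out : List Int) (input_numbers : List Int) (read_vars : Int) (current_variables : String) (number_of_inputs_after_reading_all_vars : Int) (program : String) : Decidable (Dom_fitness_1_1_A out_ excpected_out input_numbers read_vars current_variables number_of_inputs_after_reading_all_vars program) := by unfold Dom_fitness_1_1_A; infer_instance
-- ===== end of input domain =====

-- B replaces A's nested branches and accumulator loop with a decision table (first true guard wins, default -50*len(excpected_out)); objective: simpler.


-- ===== PORT A =====
def fitness_1_1_A (out_ : List Int) (excpected_out : List Int) (input_numbers : List Int) (read_vars : Int) (current_variables : String) (number_of_inputs_after_reading_all_vars : Int) (program : String) : Int :=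
  let fit : Int := 0
  if read_vars > 2 then
    if number_of_inputs_after_reading_all_vars > 0 then -1
    else if out_.length = 0 then -1234
    else if out_.contains 1 then -20
    else (PySem.List.pyRange 0 (excpected_out.length : Int) 1).foldl (fun fit _ => fit + (-50)) fit
  else -300

-- ===== PORT B =====
def fitness_1_1_A_alt (out_ : List Int) (excpected_out : List Int) (input_numbers : List Int) (read_vars : Int) (current_variables : String) (number_of_inputs_after_reading_all_vars : Int) (program : String) : Int :=
  let cases : List (Bool × Int) :=
    [ (decide (read_vars ≤ 2), -300)
    , (decide (number_of_inputs_after_reading_all_vars > 0), -1)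
    , (decide (out_.length = 0), -1234)
    , (out_.contains 1, -20) ]
  match cases.find? (fun p => p.1) with
  | some p => p.2
  | none => -50 * (excpected_out.length : Int)

-- ===== PRECONDITION & SPEC =====
def Spec_fitness_1_1_A (out_ : List Int) (excpected_out : List Int) (input_numbers : List Int) (read_vars : Int) (current_variables : String) (number_of_inputs_after_reading_all_vars : Int) (program : String) (out : Int) : Prop := out = fitness_1_1_A_alt out_ excpected_out input_numbers read_vars current_variables number_of_inputs_after_reading_all_vars program
instance (out_ : List Int) (excpected_out : List Int) (input_numbers : List Int) (read_vars : Int) (current_variables : String) (number_of_inputs_after_reading_all_vars : Int) (program : String) (out : Int) : Decidable (Spec_fitness_1_1_A out_ excpected_out input_numbers read_vars current_variables number_of_inputs_after_reading_all_vars program out) := by unfold Spec_fitness_1_1_A; infer_instance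

-- ===== CLAIM (what is proved, stated in full; the proofs are below) =====
def Claim_equal_fitness_1_1_A : Prop := ∀ (out_ : List Int) (excpected_out : List Int) (input_numbers : List Int) (read_vars : Int) (current_variables : String) (number_of_inputs_after_reading_all_vars : Int) (program : String), Dom_fitness_1_1_A out_ excpected_out input_numbers read_vars current_variables number_of_inputs_after_reading_all_vars program → Spec_fitness_1_1_A out_ excpected_out input_numbers read_vars current_variables number_of_inputs_after_reading_all_vars program (fitness_1_1_A out_ excpected_out input_numbers read_vars current_variables number_of_inputs_after_reading_all_vars program)

-- ===== LEMMAS AND PROOFS =====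
lemma foldl_const_add (l : List Int) (c : Int) :
    l.foldl (fun fit _ => fit + (-50)) c = c + (-50) * (l.length : Int) := by
  induction l generalizing c with
  | nil => simp
  | cons x xs ih => simp [List.foldl, ih]; ring

-- ===== VERDICT (by name: the statement is the Claim_ definition above) =====
theorem fitness_1_1_A_spec : Claim_equal_fitness_1_1_A := by
  intro out_ excpected_out input_numbers read_vars cv n prog _
  unfold Spec_fitness_1_1_A fitness_1_1_A fitness_1_1_A_alt
  simp only [List.find?, foldl_const_add, PySem.List.length_pyRange_one]
  by_cases h1 : read_vars ≤ 2 <;>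
  by_cases h2 : n > 0 <;>
  by_cases h3 : out_.length = 0 <;>
  by_cases h4 : 1 ∈ out_ <;>
    simp [h1, h2, h3, h4]
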